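-- pv_equiv track=rewrite | github.com/shoark7/algorithm-with-python | problems_solving/algospot/christmas.py | max_buys
-- ===== SOURCE A (Python) =====
-- def max_buys(p_gifts, K):
--     ret = [0 for _ in range(len(p_gifts))]
--     prev = [-1 for _ in range(K)]
--
--     for i in range(len(p_gifts)):
--         if i > 0:
--             ret[i] = ret[i-1]
--         else:
--             ret[i] = 0
--
--         loc = prev[p_gifts[i]]
--         if loc != -1:
--             ret[i] = max(ret[i], ret[loc]+1)
--         prev[p_gifts[i]] = i
--
--     return ret[-1]
-- ===== SOURCE B (Python) =====
-- def max_buys(p_gifts, K):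
--     count = 0
--     seen = [False] * K
--     for x in p_gifts:
--         if seen[x]:
--             count += 1
--             seen = [False] * K
--         seen[x] = True
--     return count
-- ===== Notes on version B (the rewrite author's own statement) =====
-- stated objective: alternative
-- what changed: Replaces A's prefix DP (a ret array indexed by position plus a prev array of last-occurrence indices per remainder, answer ret[-1]) with a one-pass greedy keeping only a running count and a boolean table of remainders seen since the last cut, which is reset whenever a remainder repeats.
import Mathlib
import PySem

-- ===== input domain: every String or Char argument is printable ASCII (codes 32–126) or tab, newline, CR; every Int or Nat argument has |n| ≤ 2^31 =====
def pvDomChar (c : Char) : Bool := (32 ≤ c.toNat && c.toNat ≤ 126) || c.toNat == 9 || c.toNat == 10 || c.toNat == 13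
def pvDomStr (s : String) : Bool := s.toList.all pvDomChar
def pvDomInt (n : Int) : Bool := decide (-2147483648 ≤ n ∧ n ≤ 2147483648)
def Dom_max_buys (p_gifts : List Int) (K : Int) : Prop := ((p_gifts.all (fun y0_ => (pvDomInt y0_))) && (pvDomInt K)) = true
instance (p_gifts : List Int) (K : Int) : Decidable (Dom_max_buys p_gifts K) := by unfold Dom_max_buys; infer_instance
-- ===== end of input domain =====

-- B replaces A's prefix DP over a position-indexed array with a one-pass greedy
-- (running count + boolean table of remainders since the last cut); equal return value on Pre_.

-- ===== PORT A =====
-- the body of A's for-loop, one iteration at index i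
def maxBuysStep (p_gifts : List Int) (st : List Int × List Int) (i : Int) : List Int × List Int :=
  let ret := st.1
  let prev := st.2
  let ret := if 0 < i then PySem.List.pySetD ret i (PySem.List.pyGetD ret (i - 1) 0)
             else PySem.List.pySetD ret i 0
  let loc := PySem.List.pyGetD prev (PySem.List.pyGetD p_gifts i 0) 0
  let ret := if loc ≠ -1 then
      PySem.List.pySetD ret i (max (PySem.List.pyGetD ret i 0) (PySem.List.pyGetD ret loc 0 + 1))
    else ret
  let prev := PySem.List.pySetD prev (PySem.List.pyGetD p_gifts i 0) i
  (ret, prev)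

def max_buys (p_gifts : List Int) (K : Int) : Int :=
  let ret : List Int := (PySem.List.pyRange 0 (p_gifts.length : Int)).map (fun _ => (0 : Int))
  let prev : List Int := (PySem.List.pyRange 0 K).map (fun _ => (-1 : Int))
  let st := (PySem.List.pyRange 0 (p_gifts.length : Int)).foldl (maxBuysStep p_gifts) (ret, prev)
  PySem.List.pyGetD st.1 (-1) 0

-- ===== PORT B =====
-- [False] * K
def maxBuysFresh (K : Int) : List Bool :=
  (PySem.List.pyRange 0 K).map (fun _ => false)

-- the body of B's for-loop, one element x
def maxBuysAltStep (K : Int) (st : Int × List Bool) (x : Int) : Int × List Bool :=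
  let count := st.1
  let seen := st.2
  if PySem.List.pyGetD seen x false then
    (count + 1, PySem.List.pySetD (maxBuysFresh K) x true)
  else (count, PySem.List.pySetD seen x true)

def max_buys_alt (p_gifts : List Int) (K : Int) : Int :=
  (p_gifts.foldl (maxBuysAltStep K) (0, maxBuysFresh K)).1

-- ===== PRECONDITION & SPEC =====
-- Pre_ is exactly where the Python A returns normally: a nonempty list (ret[-1]),
-- K ≥ 1 (prev = [-1]*K must be indexable) and every element inside [-K, K) (prev[p_gifts[i]]).
def Pre_max_buys (p_gifts : List Int) (K : Int) : Prop :=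
  p_gifts ≠ [] ∧ 1 ≤ K ∧ ∀ v ∈ p_gifts, -K ≤ v ∧ v < K
instance (p_gifts : List Int) (K : Int) : Decidable (Pre_max_buys p_gifts K) := by
  unfold Pre_max_buys; infer_instance
def pvWitness_max_buys : List Int × Int := ([1, 0, -2, 1, 2], 3)

def Spec_max_buys (p_gifts : List Int) (K : Int) (out : Int) : Prop := out = max_buys_alt p_gifts K
instance (p_gifts : List Int) (K : Int) (out : Int) : Decidable (Spec_max_buys p_gifts K out) := by
  unfold Spec_max_buys; infer_instance

-- ===== CLAIM (what is proved, stated in full; the proofs are below) =====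
def Claim_equal_max_buys : Prop := ∀ (p_gifts : List Int) (K : Int), Dom_max_buys p_gifts K → Pre_max_buys p_gifts K → Spec_max_buys p_gifts K (max_buys p_gifts K)

-- ===== LEMMAS AND PROOFS =====

-- Python's wrapped index of v in a length-K list (K > 0) for v already in [-K, K):
-- identity on [0, K), shift by K below 0.
def wrapIdx (K v : Int) : Int := if 0 ≤ v then v else v + K

-- reading xs[v] (possibly negative v) is reading index (wrapIdx K v)
lemma wrap_get {α : Type} (xs : List α) (K v : Int) (d : α) (hK : 1 ≤ K)
    (hlen : xs.length = K.toNat) (h1 : -K ≤ v) (h2 : v < K) :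
    PySem.List.pyGetD xs v d = xs.getD (wrapIdx K v).toNat d := by
  by_cases hv : 0 ≤ v
  · rw [PySem.List.pyGetD_of_nonneg xs d hv, wrapIdx, if_pos hv]
  · rw [wrapIdx, if_neg hv]
    simp only [PySem.List.pyGetD, PySem.List.pyGet?, PySem.List.pyIdx?]
    rw [if_neg hv, if_pos (by omega : -(xs.length : Int) ≤ v)]
    simp only [List.getD_eq_getElem?_getD]
    have hidx : xs.length - (-v).toNat = (v + K).toNat := by omega
    rw [hidx]
    rfl

-- writing xs[v] = w (possibly negative v) is setting index (wrapIdx K v)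
lemma wrap_set {α : Type} (xs : List α) (K v : Int) (w : α) (hK : 1 ≤ K)
    (hlen : xs.length = K.toNat) (h1 : -K ≤ v) (h2 : v < K) :
    PySem.List.pySetD xs v w = xs.set (wrapIdx K v).toNat w := by
  by_cases hv : 0 ≤ v
  · rw [PySem.List.pySetD_of_nonneg xs w hv, wrapIdx, if_pos hv]
  · rw [wrapIdx, if_neg hv]
    simp only [PySem.List.pySetD, PySem.List.pySet?, PySem.List.pyIdx?]
    rw [if_neg hv, if_pos (by omega : -(xs.length : Int) ≤ v)]
    simp only [Option.map_some, Option.getD_some]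
    have hidx : xs.length - (-v).toNat = (v + K).toNat := by omega
    rw [hidx]

lemma length_fresh (K : Int) (hK : 1 ≤ K) : (maxBuysFresh K).length = K.toNat := by
  rw [maxBuysFresh, List.length_map, PySem.List.length_pyRange_one]; omega

lemma fresh_getD (K : Int) (t : Nat) (ht : t < K.toNat) :
    (maxBuysFresh K).getD t false = false := by
  have htlen : t < (maxBuysFresh K).length := by
    rw [maxBuysFresh, List.length_map, PySem.List.length_pyRange_one]; omega
  rw [List.getD_eq_getElem?_getD, List.getElem?_eq_getElem htlen]
  simp [maxBuysFresh]

-- the coupling invariant between A's state (ret, prev)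
-- and B's state (count, seen) after the first k iterations
def MBInv (p_gifts : List Int) (K : Int) (k : Nat)
    (a : List Int × List Int) (b : Int × List Bool) : Prop :=
  a.1.length = p_gifts.length ∧ a.2.length = K.toNat ∧ b.2.length = K.toNat ∧ 0 ≤ b.1 ∧
  (k = 0 → b.1 = 0) ∧
  (0 < k → a.1.getD (k - 1) 0 = b.1) ∧
  (∀ t : Nat, t < K.toNat → b.2.getD t false = true →
      ∃ j : Nat, j < k ∧ a.2.getD t 0 = (j : Int) ∧ a.1.getD j 0 = b.1) ∧
  (∀ t : Nat, t < K.toNat → b.2.getD t false = false →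
      a.2.getD t 0 = -1 ∨ ∃ j : Nat, j < k ∧ a.2.getD t 0 = (j : Int) ∧ a.1.getD j 0 ≤ b.1 - 1)

lemma getD_set_self {α : Type} (l : List α) (n : Nat) (x d : α) (h : n < l.length) :
    (l.set n x).getD n d = x := by
  simp [List.getD_eq_getElem?_getD, h]

lemma getD_set_ne {α : Type} (l : List α) (m n : Nat) (x d : α) (h : m ≠ n) :
    (l.set m x).getD n d = l.getD n d := by
  simp [List.getD_eq_getElem?_getD, h]

lemma mbinv_step (p_gifts : List Int) (K : Int) (hK : 1 ≤ K)
    (hvals : ∀ v ∈ p_gifts, -K ≤ v ∧ v < K) (k : Nat) (hk : k < p_gifts.length)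
    (a : List Int × List Int) (b : Int × List Bool)
    (h : MBInv p_gifts K k a b) :
    MBInv p_gifts K (k + 1) (maxBuysStep p_gifts a ((k : Nat) : Int))
      (maxBuysAltStep K b (p_gifts.getD k 0)) := by
  obtain ⟨ret, prev⟩ := a
  obtain ⟨count, seen⟩ := b
  obtain ⟨hlen1, hlen2, hlen3, hcnt, h0, hlast, hS1, hS2⟩ := h
  simp only at hlen1 hlen2 hlen3 hcnt h0 hlast hS1 hS2
  have hkret : k < ret.length := by omega
  set v := p_gifts.getD k 0 with hvdef
  have hvmem : v ∈ p_gifts := by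
    rw [hvdef, List.getD_eq_getElem?_getD, List.getElem?_eq_getElem hk, Option.getD_some]
    exact List.getElem_mem hk
  have hv := hvals v hvmem
  set r := wrapIdx K v with hrdef
  have hr : 0 ≤ r ∧ r < K := by rw [hrdef, wrapIdx]; split <;> omega
  have hidxlt : r.toNat < prev.length := by omega
  have hidxlt3 : r.toNat < seen.length := by omega
  have hgetp : PySem.List.pyGetD p_gifts ((k : Nat) : Int) 0 = v :=
    PySem.List.pyGetD_natCast p_gifts k 0
  have hfirst : (if 0 < ((k : Nat) : Int) then
        PySem.List.pySetD ret ((k : Nat) : Int) (PySem.List.pyGetD ret (((k : Nat) : Int) - 1) 0)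
      else PySem.List.pySetD ret ((k : Nat) : Int) 0) = ret.set k count := by
    by_cases hk0 : k = 0
    · rw [if_neg (by omega), h0 hk0, PySem.List.pySetD_of_nonneg ret 0 (by omega)]
      simp
    · rw [if_pos (by omega), show ((k : Nat) : Int) - 1 = (((k - 1 : Nat)) : Int) by omega,
        PySem.List.pyGetD_natCast, hlast (by omega)]
      simp
  have hstep : maxBuysStep p_gifts (ret, prev) ((k : Nat) : Int) =
      ((if prev.getD r.toNat 0 ≠ -1 then
          PySem.List.pySetD (ret.set k count) ((k : Nat) : Int)
            (max (PySem.List.pyGetD (ret.set k count) ((k : Nat) : Int) 0)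
                 (PySem.List.pyGetD (ret.set k count) (prev.getD r.toNat 0) 0 + 1))
        else ret.set k count),
       prev.set r.toNat ((k : Nat) : Int)) := by
    simp only [maxBuysStep]
    rw [hgetp, hfirst, wrap_get prev K v 0 hK hlen2 hv.1 hv.2,
      wrap_set prev K v ((k : Nat) : Int) hK hlen2 hv.1 hv.2, ← hrdef]
  have hgetk : PySem.List.pyGetD (ret.set k count) ((k : Nat) : Int) 0 = count := by
    rw [PySem.List.pyGetD_natCast]
    exact getD_set_self ret k count 0 hkret
  have hseenv : PySem.List.pyGetD seen v false = seen.getD r.toNat false :=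
    wrap_get seen K v false hK hlen3 hv.1 hv.2
  by_cases hmem : seen.getD r.toNat false = true
  · -- repeat remainder: A bumps via ret[loc]+1, B cuts
    obtain ⟨j, hj, hprevj, hretj⟩ := hS1 r.toNat (by omega) hmem
    have hjk : j ≠ k := by omega
    have hgetj : PySem.List.pyGetD (ret.set k count) ((j : Nat) : Int) 0 = count := by
      rw [PySem.List.pyGetD_natCast, getD_set_ne ret k j count 0 (by omega), hretj]
    have hstep2 : maxBuysStep p_gifts (ret, prev) ((k : Nat) : Int) =
        (ret.set k (count + 1), prev.set r.toNat ((k : Nat) : Int)) := by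
      rw [hstep, if_pos (by rw [hprevj]; omega), hprevj, hgetj, hgetk]
      rw [show max count (count + 1) = count + 1 by omega]
      simp [List.set_set]
    have haltstep : maxBuysAltStep K (count, seen) v =
        (count + 1, (maxBuysFresh K).set r.toNat true) := by
      simp only [maxBuysAltStep]
      rw [hseenv, if_pos hmem,
        wrap_set (maxBuysFresh K) K v true hK (length_fresh K hK) hv.1 hv.2, ← hrdef]
    rw [hstep2, haltstep]
    have hfreshlen : r.toNat < (maxBuysFresh K).length := by rw [length_fresh K hK]; omega
    refine ⟨by simpa using hlen1, by simpa using hlen2,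
      by simpa [length_fresh K hK] using rfl, by omega, by omega, ?_, ?_, ?_⟩
    · intro _
      simpa using getD_set_self ret k (count + 1) 0 hkret
    · intro t ht htt
      have : t = r.toNat := by
        by_contra hne
        rw [getD_set_ne (maxBuysFresh K) r.toNat t true false (by omega),
          fresh_getD K t ht] at htt
        exact Bool.false_ne_true htt
      subst this
      refine ⟨k, by omega, ?_, ?_⟩
      · simpa using getD_set_self prev r.toNat ((k : Nat) : Int) 0 hidxlt
      · simpa using getD_set_self ret k (count + 1) 0 hkret
    · intro t ht htt
      have htr : t ≠ r.toNat := by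
        intro he
        rw [he, getD_set_self (maxBuysFresh K) r.toNat true false hfreshlen] at htt
        exact absurd htt (by simp)
      have hprevt : (prev.set r.toNat ((k : Nat) : Int)).getD t 0 = prev.getD t 0 :=
        getD_set_ne prev r.toNat t ((k : Nat) : Int) 0 (by omega)
      by_cases hts : seen.getD t false = true
      · obtain ⟨j', hj', hpj', hrj'⟩ := hS1 t ht hts
        right
        refine ⟨j', by omega, ?_, ?_⟩
        · rw [hprevt]; exact hpj'
        · rw [getD_set_ne ret k j' (count + 1) 0 (by omega)]
          omega
      · rcases hS2 t ht (by simpa using hts) with hm1 | ⟨j', hj', hpj', hrj'⟩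
        · left; rw [hprevt]; exact hm1
        · right
          refine ⟨j', by omega, by rw [hprevt]; exact hpj', ?_⟩
          rw [getD_set_ne ret k j' (count + 1) 0 (by omega)]
          omega
  · -- new remainder since the last cut: A's max is a no-op, B records it
    have hmem' : seen.getD r.toNat false = false := by simpa using hmem
    have hstep2 : maxBuysStep p_gifts (ret, prev) ((k : Nat) : Int) =
        (ret.set k count, prev.set r.toNat ((k : Nat) : Int)) := by
      rcases hS2 r.toNat (by omega) hmem' with hm1 | ⟨j, hj, hpj, hrj⟩
      · rw [hstep, if_neg (by rw [hm1]; simp)]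
      · have hgetj : PySem.List.pyGetD (ret.set k count) ((j : Nat) : Int) 0 = ret.getD j 0 := by
          rw [PySem.List.pyGetD_natCast]
          exact getD_set_ne ret k j count 0 (by omega)
        rw [hstep, if_pos (by rw [hpj]; omega), hpj, hgetj, hgetk]
        rw [show max count (ret.getD j 0 + 1) = count by omega]
        simp [List.set_set]
    have haltstep : maxBuysAltStep K (count, seen) v = (count, seen.set r.toNat true) := by
      simp only [maxBuysAltStep]
      rw [hseenv, if_neg (by rw [hmem']; exact Bool.false_ne_true),
        wrap_set seen K v true hK hlen3 hv.1 hv.2, ← hrdef]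
    rw [hstep2, haltstep]
    refine ⟨by simpa using hlen1, by simpa using hlen2, by simpa using hlen3,
      by omega, by omega, ?_, ?_, ?_⟩
    · intro _
      simpa using getD_set_self ret k count 0 hkret
    · intro t ht htt
      by_cases htr : t = r.toNat
      · subst htr
        refine ⟨k, by omega, ?_, ?_⟩
        · simpa using getD_set_self prev r.toNat ((k : Nat) : Int) 0 hidxlt
        · simpa using getD_set_self ret k count 0 hkret
      · rw [getD_set_ne seen r.toNat t true false (by omega)] at htt
        obtain ⟨j', hj', hpj', hrj'⟩ := hS1 t ht htt
        refine ⟨j', by omega, ?_, ?_⟩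
        · rw [getD_set_ne prev r.toNat t ((k : Nat) : Int) 0 (by omega)]
          exact hpj'
        · rw [getD_set_ne ret k j' count 0 (by omega)]
          exact hrj'
    · intro t ht htt
      have htr : t ≠ r.toNat := by
        intro he
        rw [he, getD_set_self seen r.toNat true false hidxlt3] at htt
        exact absurd htt (by simp)
      rw [getD_set_ne seen r.toNat t true false (by omega)] at htt
      have hprevt : (prev.set r.toNat ((k : Nat) : Int)).getD t 0 = prev.getD t 0 :=
        getD_set_ne prev r.toNat t ((k : Nat) : Int) 0 (by omega)
      rcases hS2 t ht htt with hm1 | ⟨j', hj', hpj', hrj'⟩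
      · left; rw [hprevt]; exact hm1
      · right
        refine ⟨j', by omega, by rw [hprevt]; exact hpj', ?_⟩
        rw [getD_set_ne ret k j' count 0 (by omega)]
        omega

-- the invariant holds after every prefix of the loop
lemma mbinv_all (p_gifts : List Int) (K : Int) (hK : 1 ≤ K)
    (hvals : ∀ v ∈ p_gifts, -K ≤ v ∧ v < K) :
    ∀ k, k ≤ p_gifts.length →
      MBInv p_gifts K k
        ((PySem.List.pyRange 0 ((k : Nat) : Int)).foldl (maxBuysStep p_gifts)
          ((PySem.List.pyRange 0 (p_gifts.length : Int)).map (fun _ => (0 : Int)),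
           (PySem.List.pyRange 0 K).map (fun _ => (-1 : Int))))
        ((p_gifts.take k).foldl (maxBuysAltStep K) (0, maxBuysFresh K)) := by
  intro k
  induction k with
  | zero =>
    intro _
    rw [show PySem.List.pyRange 0 (((0 : Nat)) : Int) = [] from
      PySem.List.pyRange_one_eq_nil (by omega), List.take_zero]
    simp only [List.foldl_nil]
    refine ⟨?_, ?_, length_fresh K hK, le_refl 0, fun _ => rfl,
      fun h => absurd h (by omega), ?_, ?_⟩
    · rw [List.length_map, PySem.List.length_pyRange_one]; omega
    · rw [List.length_map, PySem.List.length_pyRange_one]; omega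
    · intro t ht htt
      rw [fresh_getD K t ht] at htt
      exact absurd htt Bool.false_ne_true
    · intro t ht _
      left
      have htlen : t < ((PySem.List.pyRange 0 K).map (fun _ => (-1 : Int))).length := by
        rw [List.length_map, PySem.List.length_pyRange_one]; omega
      rw [List.getD_eq_getElem?_getD, List.getElem?_eq_getElem htlen]
      simp
  | succ k ih =>
    intro hk1
    have hk : k < p_gifts.length := by omega
    have hrange : PySem.List.pyRange 0 (((k + 1 : Nat)) : Int) =
        PySem.List.pyRange 0 ((k : Nat) : Int) ++ [((k : Nat) : Int)] := by
      rw [show (((k + 1 : Nat)) : Int) = ((k : Nat) : Int) + 1 by omega]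
      exact PySem.List.pyRange_one_succ_right (by omega)
    have htake : p_gifts.take (k + 1) = p_gifts.take k ++ [p_gifts.getD k 0] := by
      rw [List.take_add_one, List.getElem?_eq_getElem hk]
      simp [List.getD_eq_getElem?_getD, List.getElem?_eq_getElem hk]
    rw [hrange, htake, List.foldl_append, List.foldl_append]
    simp only [List.foldl_cons, List.foldl_nil]
    exact mbinv_step p_gifts K hK hvals k hk _ _ (ih (by omega))


-- ===== VERDICT (by name: the statements are the Claim_ definitions above) =====
theorem max_buys_spec : Claim_equal_max_buys := by
  intro p_gifts K _ hpre
  obtain ⟨hne, hK, hvals⟩ := hpre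
  have hlen : 0 < p_gifts.length := List.length_pos_iff.mpr hne
  have hinv := mbinv_all p_gifts K hK hvals p_gifts.length le_rfl
  rw [List.take_length] at hinv
  unfold Spec_max_buys max_buys max_buys_alt
  simp only
  set stA := (PySem.List.pyRange 0 (p_gifts.length : Int)).foldl (maxBuysStep p_gifts)
      ((PySem.List.pyRange 0 (p_gifts.length : Int)).map (fun _ => (0 : Int)),
       (PySem.List.pyRange 0 K).map (fun _ => (-1 : Int))) with hstA
  set stB := p_gifts.foldl (maxBuysAltStep K) (0, maxBuysFresh K) with hstB
  obtain ⟨hlen1, _, _, _, _, hlast, _, _⟩ := hinv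
  have hgl : PySem.List.pyGetD stA.1 (-1) 0 = stA.1.getD (p_gifts.length - 1) 0 := by
    simp only [PySem.List.pyGetD, PySem.List.pyGet?_neg_one]
    rw [List.getLast?_eq_getElem?, List.getD_eq_getElem?_getD, hlen1]
  rw [hgl]
  exact hlast hlen
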